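-- pv_equiv track=rewrite | github.com/xs2811949745/pythonProject | pkt2csv.py | check_depend
-- ===== SOURCE A (Python) =====
-- def check_depend(data_section,depend_dict):
--     # 迭代depend_dict的每个kv，检查是否存在于data_section的每个数据项中
--     a=[0,0]
--     for i in data_section:
--         if(i.find("PNO")!=-1):
--             a[1]=1
--         if(i.find("PNUM")!=-1):
--             a[0]=1
--     # 如果缺则说明依赖关系未保证，返回False
--     if((a[0]==1 and a[1]==1) or(a[0]==0 and a[1]==0)):
--         return True
--     else:
--         return False
--     # 否则返回True
--     pass
-- ===== SOURCE B (Python) =====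
-- def check_depend(data_section, depend_dict):
--     # Two-phase early-exit search: find the first item carrying either marker;
--     # if none, consistent (neither present). Otherwise only the complementary
--     # marker can still be missing, so scan just the remaining items for it.
--     rest = iter(data_section)
--     for i in rest:
--         pno = i.find("PNO") != -1
--         pnum = i.find("PNUM") != -1
--         if pno or pnum:
--             if pno and pnum:
--                 return True
--             missing = "PNUM" if pno else "PNO"
--             return any(j.find(missing) != -1 for j in rest)
--     return True
-- ===== Notes on version B (the rewrite author's own statement) =====
-- stated objective: alternative
-- what changed: Replaces A's full-pass two-flag accumulation plus four-case branch by an early-exiting state machine: locate the first item carrying either marker, and if only one marker is present there, search only the remaining items for the complementary marker.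
import Mathlib
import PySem

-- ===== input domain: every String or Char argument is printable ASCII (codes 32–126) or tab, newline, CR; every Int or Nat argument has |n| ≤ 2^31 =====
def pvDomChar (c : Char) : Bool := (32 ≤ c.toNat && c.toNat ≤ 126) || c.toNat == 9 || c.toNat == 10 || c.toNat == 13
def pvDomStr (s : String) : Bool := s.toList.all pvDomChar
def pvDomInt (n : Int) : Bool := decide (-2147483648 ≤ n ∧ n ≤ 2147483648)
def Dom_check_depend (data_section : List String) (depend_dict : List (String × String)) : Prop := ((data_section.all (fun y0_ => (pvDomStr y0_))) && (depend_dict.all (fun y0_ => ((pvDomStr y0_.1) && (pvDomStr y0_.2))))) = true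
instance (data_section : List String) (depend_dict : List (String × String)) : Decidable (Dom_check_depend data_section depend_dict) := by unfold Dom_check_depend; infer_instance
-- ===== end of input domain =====

-- B replaces A's full-pass flag accumulation by an early-exiting two-phase search (objective: alternative).

-- ===== PORT A =====
-- literal port of A: one pass maintaining the two-element flag list a=[0,0] (as an Int pair), then the four-case branch
def check_depend (data_section : List String) (depend_dict : List (String × String)) : Bool :=
  let a : Int × Int := data_section.foldl (fun (a : Int × Int) i =>
    let a := if PySem.Str.find i "PNO" ≠ -1 then (a.1, 1) else a
    if PySem.Str.find i "PNUM" ≠ -1 then ((1 : Int), a.2) else a) (0, 0)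
  if (a.1 = 1 ∧ a.2 = 1) ∨ (a.1 = 0 ∧ a.2 = 0) then true else false

-- ===== PORT B =====
-- B helper: the trailing scan 'any(j.find(missing) != -1 for j in rest)'
def checkMissing (missing : String) : List String → Bool
  | [] => false
  | j :: rest => if PySem.Str.find j missing ≠ -1 then true else checkMissing missing rest

-- B helper: the leading loop searching for the first item carrying either marker
def checkLead : List String → Bool
  | [] => true
  | i :: rest =>
    let pno : Bool := PySem.Str.find i "PNO" != -1
    let pnum : Bool := PySem.Str.find i "PNUM" != -1
    if pno || pnum then
      if pno && pnum then true
      else checkMissing (if pno then "PNUM" else "PNO") rest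
    else checkLead rest

-- port of B: two-phase early-exit search
def check_depend_alt (data_section : List String) (depend_dict : List (String × String)) : Bool :=
  checkLead data_section

-- ===== PRECONDITION & SPEC =====
def Spec_check_depend (data_section : List String) (depend_dict : List (String × String)) (out : Bool) : Prop := out = check_depend_alt data_section depend_dict
instance (data_section : List String) (depend_dict : List (String × String)) (out : Bool) : Decidable (Spec_check_depend data_section depend_dict out) := by unfold Spec_check_depend; infer_instance

-- ===== CLAIM (what is proved, stated in full; the proofs are below) =====
def Claim_equal_check_depend : Prop := ∀ (data_section : List String) (depend_dict : List (String × String)), Dom_check_depend data_section depend_dict → Spec_check_depend data_section depend_dict (check_depend data_section depend_dict)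

-- ===== LEMMAS AND PROOFS =====

-- loop invariant: A's fold sets each flag to 1 iff some item matches (or it was 1 already)
theorem check_depend_flags (ds : List String) (a : Int × Int) :
    ds.foldl (fun (a : Int × Int) i =>
      let a := if PySem.Str.find i "PNO" ≠ -1 then (a.1, 1) else a
      if PySem.Str.find i "PNUM" ≠ -1 then ((1 : Int), a.2) else a) a
    = ((if ds.any (fun i => PySem.Str.find i "PNUM" ≠ -1) then 1 else a.1),
       (if ds.any (fun i => PySem.Str.find i "PNO" ≠ -1) then 1 else a.2)) := by
  induction ds generalizing a with
  | nil => simp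
  | cons x xs ih =>
    simp only [List.foldl_cons, List.any_cons, ih]
    by_cases h1 : PySem.Chars.find x.toList ['P', 'N', 'O'] = -1 <;>
      by_cases h2 : PySem.Chars.find x.toList ['P', 'N', 'U', 'M'] = -1 <;>
      simp [h1, h2, -List.any_eq_true]

-- B's trailing scan is the 'any' of the missing marker
theorem checkMissing_eq_any (m : String) (ds : List String) :
    checkMissing m ds = ds.any (fun j => PySem.Str.find j m ≠ -1) := by
  induction ds with
  | nil => rfl
  | cons x xs ih =>
    by_cases h : PySem.Str.find x m ≠ -1 <;> simp [checkMissing, h, ih]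

-- B's two-phase search decides whether PNO-presence and PNUM-presence agree
theorem checkLead_eq (ds : List String) :
    checkLead ds = (ds.any (fun i => PySem.Str.find i "PNO" ≠ -1)
                    == ds.any (fun i => PySem.Str.find i "PNUM" ≠ -1)) := by
  induction ds with
  | nil => rfl
  | cons x xs ih =>
    simp only [checkLead, checkMissing_eq_any, List.any_cons]
    cases h1 : (PySem.Str.find x "PNO" != -1) <;>
      cases h2 : (PySem.Str.find x "PNUM" != -1) <;>
      simp only [h1, h2, Bool.false_or, Bool.true_or, Bool.or_false, Bool.or_true,
        Bool.false_and, Bool.true_and, if_true, if_false, Bool.false_eq_true,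
        Bool.true_eq_false, ite_true, ite_false, ih]
    · cases xs.any (fun i => PySem.Str.find i "PNO" ≠ -1) <;>
        cases xs.any (fun i => PySem.Str.find i "PNUM" ≠ -1) <;>
        simp_all
    · cases xs.any (fun i => PySem.Str.find i "PNUM" ≠ -1) <;> simp_all
    · cases xs.any (fun i => PySem.Str.find i "PNO" ≠ -1) <;> simp_all
    · simp_all

-- ===== VERDICT (by name: the statement is the Claim_ definition above) =====
theorem check_depend_spec : Claim_equal_check_depend := by
  intro ds dd _
  unfold Spec_check_depend check_depend check_depend_alt
  simp only [check_depend_flags, checkLead_eq]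
  cases h1 : ds.any (fun i => PySem.Str.find i "PNO" ≠ -1) <;>
    cases h2 : ds.any (fun i => PySem.Str.find i "PNUM" ≠ -1) <;>
    simp [h1, h2, -List.any_eq_true]
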